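-- pv_equiv track=rewrite | github.com/verwoerd/AoC2021 | day10/src/main/python/solution.py | score_finish_error
-- ===== SOURCE A (Python) =====
-- def closing_char(c):
--     if c == '(':
--         return ')'
--     elif c == '<':
--         return '>'
--     elif c == '{':
--         return '}'
--     else:
--         return ']'
--
-- def score_finish_error(errors):
--     if errors[0] != ' ':
--         return 0
--     count = 0
--     for c in reversed(errors[1]):
--         count *= 5
--         if closing_char(c) == ')':
--             count += 1
--         elif closing_char(c) == ']':
--             count += 2
--         elif closing_char(c) == '}':
--             count += 3
--         else:
--             count += 4
--     return count
-- ===== SOURCE B (Python) =====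
-- def score_finish_error(errors):
--     if errors[0] != ' ':
--         return 0
--     digit = {'(': '1', '{': '3', '<': '4'}
--     s = ''.join(digit.get(c, '2') for c in reversed(errors[1]))
--     return int(s, 5) if s else 0
-- ===== Notes on version B (the rewrite author's own statement) =====
-- stated objective: idiomatic
-- what changed: Replaces the manual Horner multiply-accumulate loop over closing_char's if/elif chain with a dict digit lookup that builds a base-5 digit string from the reversed list and parses it with Python's built-in int(s, 5) (empty string guarded to 0).
import Mathlib
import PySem

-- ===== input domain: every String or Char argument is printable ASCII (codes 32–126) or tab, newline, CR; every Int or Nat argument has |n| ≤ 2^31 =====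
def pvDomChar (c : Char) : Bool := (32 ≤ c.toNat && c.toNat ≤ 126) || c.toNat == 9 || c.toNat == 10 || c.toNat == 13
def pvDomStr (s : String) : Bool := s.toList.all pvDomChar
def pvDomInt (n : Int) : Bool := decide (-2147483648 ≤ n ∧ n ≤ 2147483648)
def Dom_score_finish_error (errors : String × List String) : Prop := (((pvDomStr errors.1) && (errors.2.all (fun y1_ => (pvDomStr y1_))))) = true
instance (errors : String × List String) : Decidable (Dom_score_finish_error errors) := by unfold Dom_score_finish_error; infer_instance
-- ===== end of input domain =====

-- B replaces A's manual Horner loop over closing_char's if/elif chain with a dict digit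
-- lookup building a base-5 digit string that is parsed with int(s, 5) (idiomatic, same cost).


-- ===== PORT A =====
def closingChar (c : String) : String :=
  if c = "(" then ")"
  else if c = "<" then ">"
  else if c = "{" then "}"
  else "]"

def score_finish_error (errors : String × List String) : Int :=
  if errors.1 ≠ " " then 0
  else
    errors.2.reverse.foldl (fun count c =>
      let count := count * 5
      if closingChar c = ")" then count + 1
      else if closingChar c = "]" then count + 2
      else if closingChar c = "}" then count + 3
      else count + 4) 0

-- ===== PORT B =====
-- digit.get(c, '2') with digit = {'(': '1', '{': '3', '<': '4'}
def digitGet (c : String) : Char :=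
  if c = "(" then '1' else if c = "{" then '3' else if c = "<" then '4' else '2'

-- int(s, 5): hand port, exact here because s consists only of digit chars '1'..'4'
def parseBase5 (s : List Char) : Int :=
  s.foldl (fun acc d => acc * 5 + (Int.ofNat d.toNat - 48)) 0

def score_finish_error_alt (errors : String × List String) : Int :=
  if errors.1 ≠ " " then 0
  else
    let s : List Char := errors.2.reverse.map digitGet
    if s = [] then 0 else parseBase5 s

-- ===== PRECONDITION & SPEC =====
def Spec_score_finish_error (errors : String × List String) (out : Int) : Prop := out = score_finish_error_alt errors
instance (errors : String × List String) (out : Int) : Decidable (Spec_score_finish_error errors out) := by unfold Spec_score_finish_error; infer_instance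

-- ===== CLAIM (what is proved, stated in full; the proofs are below) =====
def Claim_equal_score_finish_error : Prop := ∀ (errors : String × List String), Dom_score_finish_error errors → Spec_score_finish_error errors (score_finish_error errors)

-- ===== LEMMAS AND PROOFS =====
theorem step_agree (acc : Int) (c : String) :
    (let count := acc * 5;
     if closingChar c = ")" then count + 1
     else if closingChar c = "]" then count + 2
     else if closingChar c = "}" then count + 3
     else count + 4)
    = acc * 5 + (Int.ofNat (digitGet c).toNat - 48) := by
  by_cases h1 : c = "(" <;> by_cases h2 : c = "<" <;> by_cases h3 : c = "{" <;>
    simp [closingChar, digitGet, h1, h2, h3]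

theorem fold_agree (l : List String) (acc : Int) :
    l.foldl (fun count c =>
      let count := count * 5
      if closingChar c = ")" then count + 1
      else if closingChar c = "]" then count + 2
      else if closingChar c = "}" then count + 3
      else count + 4) acc
    = (l.map digitGet).foldl (fun acc d => acc * 5 + (Int.ofNat d.toNat - 48)) acc := by
  induction l generalizing acc with
  | nil => rfl
  | cons x xs ih => rw [List.foldl_cons, List.map_cons, List.foldl_cons, step_agree, ih]

-- ===== VERDICT (by name: the statement is the Claim_ definition above) =====
theorem score_finish_error_spec : Claim_equal_score_finish_error := by
  intro e _
  unfold Spec_score_finish_error score_finish_error score_finish_error_alt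
  by_cases h : e.1 ≠ " "
  · simp [h]
  · simp only [h, if_false]
    by_cases h2 : e.2.reverse.map digitGet = []
    · -- mapped list empty ⇒ reversed list empty ⇒ fold is 0
      have h3 := List.map_eq_nil_iff.mp h2
      simp [h3]
    · simp only [h2, if_false, parseBase5]
      exact fold_agree _ 0
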